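-- pv_equiv track=rewrite | github.com/testnet22/AdventCode2023 | source/Day7.py | sortCard
-- ===== SOURCE A (Python) =====
-- def sortCard(card):
--     num=[]
--     alp=[]
--     str=''
--     for chr in card:
--         if chr.isnumeric():
--             num.append(chr)
--         else:
--             alp.append(chr)
--     return str.join(sorted(alp,reverse=True)+sorted(num,reverse=True))
-- ===== SOURCE B (Python) =====
-- def sortCard(card):
--     return ''.join(sorted(card, key=lambda c: (not c.isnumeric(), c), reverse=True))
-- ===== Notes on version B (the rewrite author's own statement) =====
-- stated objective: idiomatic
-- what changed: Replaced the manual partition loop and two separate reverse sorts with a single sorted() call over all characters using the composite key (not c.isnumeric(), c) with reverse=True, joined directly.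
import Mathlib
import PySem

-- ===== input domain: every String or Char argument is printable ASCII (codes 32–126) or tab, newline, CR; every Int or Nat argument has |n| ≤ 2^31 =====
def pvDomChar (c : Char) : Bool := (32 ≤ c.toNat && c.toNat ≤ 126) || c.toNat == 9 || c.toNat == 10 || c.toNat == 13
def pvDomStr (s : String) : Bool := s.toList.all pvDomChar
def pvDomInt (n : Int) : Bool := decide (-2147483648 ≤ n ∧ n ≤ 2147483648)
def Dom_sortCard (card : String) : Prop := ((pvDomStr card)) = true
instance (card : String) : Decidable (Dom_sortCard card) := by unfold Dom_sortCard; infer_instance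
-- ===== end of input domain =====

-- B replaces A's partition loop + two reverse sorts by ONE sorted call with the composite key
-- (not c.isnumeric(), c), reverse=True — more idiomatic, same exact output.
-- (On this printable-ASCII domain, Python's str.isnumeric coincides with PySem.Chars.isdigit.)

-- ===== PORT A =====
def sortCard (card : String) : String :=
  -- num=[]; alp=[]; for chr in card: append to num if chr.isnumeric() else to alp
  let p := card.toList.foldl
    (fun (p : List Char × List Char) c =>
      if PySem.Chars.isdigit c then (p.1 ++ [c], p.2) else (p.1, p.2 ++ [c]))
    ([], [])
  -- ''.join(sorted(alp, reverse=True) + sorted(num, reverse=True))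
  String.ofList (PySem.List.sorted p.2 (fun c => c) true ++ PySem.List.sorted p.1 (fun c => c) true)

-- ===== PORT B =====
def sortCard_alt (card : String) : String :=
  -- ''.join(sorted(card, key=lambda c: (not c.isnumeric(), c), reverse=True))
  String.ofList (PySem.List.sorted2 card.toList (fun c => !PySem.Chars.isdigit c) (fun c => c) true)

-- ===== PRECONDITION & SPEC =====
def Spec_sortCard (card : String) (out : String) : Prop := out = sortCard_alt card
instance (card : String) (out : String) : Decidable (Spec_sortCard card out) := by unfold Spec_sortCard; infer_instance

-- ===== CLAIM (what is proved, stated in full; the proofs are below) =====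
def Claim_equal_sortCard : Prop := ∀ (card : String), Dom_sortCard card → Spec_sortCard card (sortCard card)

-- ===== LEMMAS AND PROOFS =====

-- the composite key as a single integer: non-digits strictly above all digits, then code point
def pvKey (c : Char) : Int := (if PySem.Chars.isdigit c then 0 else 1114112) + c.toNat

lemma pvChar_toNat_lt (c : Char) : c.toNat < 1114112 := by
  show c.val.toNat < 1114112
  have h := c.valid
  rcases h with h | h <;> omega

lemma pvChar_lt_iff (a b : Char) : a < b ↔ a.toNat < b.toNat := by
  rw [Char.lt_def, UInt32.lt_iff_toNat_lt]; exact Iff.rfl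

lemma pvChar_le_iff (a b : Char) : a ≤ b ↔ a.toNat ≤ b.toNat := by
  rw [Char.le_def, UInt32.le_iff_toNat_le]; exact Iff.rfl

lemma pvKey_inj : Function.Injective pvKey := by
  intro a b h
  have ha := pvChar_toNat_lt a
  have hb := pvChar_toNat_lt b
  have htn : a.toNat = b.toNat := by
    unfold pvKey at h
    split_ifs at h <;> omega
  exact Char.ext (UInt32.toNat_inj.mp htn)

lemma pvBefore_eq (a b : Char) :
    (decide ((!PySem.Chars.isdigit b) < (!PySem.Chars.isdigit a)) ||
      (!decide ((!PySem.Chars.isdigit a) < (!PySem.Chars.isdigit b)) && decide (b < a)))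
      = decide (pvKey b < pvKey a) := by
  have ha2 := pvChar_toNat_lt a
  have hb2 := pvChar_toNat_lt b
  cases hda : PySem.Chars.isdigit a <;> cases hdb : PySem.Chars.isdigit b <;>
    simp [pvKey, hda, hdb, Bool.lt_iff, pvChar_lt_iff] <;> omega

-- B's lexicographic tuple sort IS the single-integer-key sort
lemma pvSorted2_eq (xs : List Char) :
    PySem.List.sorted2 xs (fun c => !PySem.Chars.isdigit c) (fun c => c) true
      = PySem.List.sorted xs pvKey true := by
  show List.foldl (fun acc x => PySem.List.insertBy
      (fun a b => decide ((!PySem.Chars.isdigit b) < (!PySem.Chars.isdigit a)) ||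
        (!decide ((!PySem.Chars.isdigit a) < (!PySem.Chars.isdigit b)) && decide (b < a))) x acc) [] xs
    = List.foldl (fun acc x => PySem.List.insertBy (fun a b => decide (pvKey b < pvKey a)) x acc) [] xs
  have hf : (fun a b : Char => decide ((!PySem.Chars.isdigit b) < (!PySem.Chars.isdigit a)) ||
        (!decide ((!PySem.Chars.isdigit a) < (!PySem.Chars.isdigit b)) && decide (b < a)))
      = (fun a b : Char => decide (pvKey b < pvKey a)) := by
    funext a b; exact pvBefore_eq a b
  rw [hf]

-- the partition loop, characterised by filters
lemma pvPart (l : List Char) (n a : List Char) :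
    l.foldl (fun (p : List Char × List Char) c =>
        if PySem.Chars.isdigit c then (p.1 ++ [c], p.2) else (p.1, p.2 ++ [c])) (n, a)
      = (n ++ l.filter (fun c => PySem.Chars.isdigit c),
         a ++ l.filter (fun c => !PySem.Chars.isdigit c)) := by
  induction l generalizing n a with
  | nil => simp
  | cons c t ih =>
    by_cases h : PySem.Chars.isdigit c = true <;>
      simp [h, ih, List.append_assoc]

theorem sortCard_spec_aux (card : String) : sortCard card = sortCard_alt card := by
  unfold sortCard sortCard_alt
  rw [pvSorted2_eq, pvPart]
  set l := card.toList with hl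
  set num := l.filter (fun c => PySem.Chars.isdigit c) with hnum
  set alp := l.filter (fun c => !PySem.Chars.isdigit c) with halp
  simp only [List.nil_append]
  congr 1
  apply PySem.List.eq_of_perm_of_pairwise_le_of_injective (fun c => -pvKey c)
    (fun a b h => pvKey_inj (neg_injective h))
  · -- permutation
    exact ((((PySem.List.sorted_perm ..).append (PySem.List.sorted_perm ..)).trans
      List.perm_append_comm).trans (List.filter_append_perm _ l)).trans
      (PySem.List.sorted_perm ..).symm
  · -- LHS pairwise: -pvKey ascending down the concatenation
    rw [List.pairwise_append]
    refine ⟨?_, ?_, ?_⟩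
    · refine (PySem.List.sorted_pairwise_rev alp (fun c => c)).imp_of_mem ?_
      intro a b hma hmb hba
      have ha : PySem.Chars.isdigit a = false := by
        simpa using (List.mem_filter.mp ((PySem.List.mem_sorted ..).mp hma)).2
      have hb : PySem.Chars.isdigit b = false := by
        simpa using (List.mem_filter.mp ((PySem.List.mem_sorted ..).mp hmb)).2
      have := (pvChar_le_iff b a).mp hba
      simp [pvKey, ha, hb]; omega
    · refine (PySem.List.sorted_pairwise_rev num (fun c => c)).imp_of_mem ?_
      intro a b hma hmb hba
      have ha : PySem.Chars.isdigit a = true :=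
        (List.mem_filter.mp ((PySem.List.mem_sorted ..).mp hma)).2
      have hb : PySem.Chars.isdigit b = true :=
        (List.mem_filter.mp ((PySem.List.mem_sorted ..).mp hmb)).2
      have := (pvChar_le_iff b a).mp hba
      simp [pvKey, ha, hb]; omega
    · intro a hma b hmb
      have ha : PySem.Chars.isdigit a = false := by
        simpa using (List.mem_filter.mp ((PySem.List.mem_sorted ..).mp hma)).2
      have hb : PySem.Chars.isdigit b = true :=
        (List.mem_filter.mp ((PySem.List.mem_sorted ..).mp hmb)).2
      have ha2 := pvChar_toNat_lt a
      have hb2 := pvChar_toNat_lt b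
      simp [pvKey, ha, hb]; omega
  · -- RHS pairwise
    refine (PySem.List.sorted_pairwise_rev l pvKey).imp ?_
    intro a b h; omega

-- ===== VERDICT (by name: the statement is the Claim_ definition above) =====
theorem sortCard_spec : Claim_equal_sortCard := by
  intro card _
  exact sortCard_spec_aux card
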